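-- pv_equiv track=rewrite | github.com/wade-code/python-misc | sar.py | sar8
-- ===== SOURCE A (Python) =====
-- def sar8(x, m):
--   if x & 0x80 != 0:
--     filler = 0
--     for i in range(m):
--       filler |= 1 << 7-i
--     x = (x >> m) | filler
--     return x
--   else:
--     return x >> m
-- ===== SOURCE B (Python) =====
-- def sar8(x, m):
--   if x & 0x80 != 0:
--     return (x >> m) | (((1 << m) - 1) << (8 - m))
--   else:
--     return x >> m
-- ===== Notes on version B (the rewrite author's own statement) =====
-- stated objective: simpler
-- what changed: Replaces the OR-accumulating loop over range(m) that builds the sign-extension filler bit by bit with a closed-form mask ((1 << m) - 1) << (8 - m), so the negative branch is a single expression with no loop.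
import Mathlib
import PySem

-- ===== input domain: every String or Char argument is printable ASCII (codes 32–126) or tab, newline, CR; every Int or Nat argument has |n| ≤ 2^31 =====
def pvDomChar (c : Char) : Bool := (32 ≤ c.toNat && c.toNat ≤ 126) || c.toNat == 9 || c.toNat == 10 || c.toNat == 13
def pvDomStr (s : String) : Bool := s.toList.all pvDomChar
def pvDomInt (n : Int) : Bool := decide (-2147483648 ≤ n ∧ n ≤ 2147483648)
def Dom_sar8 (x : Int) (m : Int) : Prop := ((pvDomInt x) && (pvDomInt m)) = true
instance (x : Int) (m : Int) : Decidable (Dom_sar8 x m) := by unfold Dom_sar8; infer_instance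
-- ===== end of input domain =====

-- B replaces A's bit-by-bit OR loop building the sign-extension filler with the closed-form mask ((1 <<< m) - 1) <<< (8 - m): simpler, no loop.


-- ===== PORT A =====
def sar8 (x : Int) (m : Int) : Int :=
  if PySem.Int.band x 0x80 ≠ 0 then
    let filler := (PySem.List.pyRange 0 m 1).foldl
      (fun f i => PySem.Int.bor f (1 <<< (7 - i).toNat)) 0
    PySem.Int.bor (x >>> m.toNat) filler
  else
    x >>> m.toNat

-- ===== PORT B =====
def sar8_alt (x : Int) (m : Int) : Int :=
  if PySem.Int.band x 0x80 ≠ 0 then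
    PySem.Int.bor (x >>> m.toNat) (((1 <<< m.toNat) - 1) <<< (8 - m).toNat)
  else
    x >>> m.toNat

-- ===== PRECONDITION & SPEC =====
-- Pre_ excludes exactly the inputs where Python A raises ValueError: m < 0 (negative
-- shift in x >> m), and m ≥ 9 when the sign bit is set (the loop reaches 1 << -1).
def Pre_sar8 (x : Int) (m : Int) : Prop := 0 ≤ m ∧ (PySem.Int.band x 0x80 ≠ 0 → m ≤ 8)
instance (x : Int) (m : Int) : Decidable (Pre_sar8 x m) := by unfold Pre_sar8; infer_instance
def pvWitness_sar8 : Int × Int := (0x85, 2)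

def Spec_sar8 (x : Int) (m : Int) (out : Int) : Prop := out = sar8_alt x m
instance (x : Int) (m : Int) (out : Int) : Decidable (Spec_sar8 x m out) := by unfold Spec_sar8; infer_instance

-- ===== CLAIM (what is proved, stated in full; the proofs are below) =====
def Claim_equal_sar8 : Prop := ∀ (x : Int) (m : Int), Dom_sar8 x m → Pre_sar8 x m → Spec_sar8 x m (sar8 x m)

-- ===== LEMMAS AND PROOFS =====
-- The filler of A's loop equals B's closed-form mask, for each admissible m.
theorem filler_eq (m : Int) (h0 : 0 ≤ m) (h8 : m ≤ 8) :
    (PySem.List.pyRange 0 m 1).foldl (fun f i => PySem.Int.bor f (1 <<< (7 - i).toNat)) 0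
      = ((1 <<< m.toNat) - 1) <<< (8 - m).toNat := by
  interval_cases m <;> decide

-- ===== VERDICT (by name: the statement is the Claim_ definition above) =====
theorem sar8_spec : Claim_equal_sar8 := by
  intro x m _ hpre
  unfold Spec_sar8 sar8 sar8_alt
  by_cases hb : PySem.Int.band x 0x80 ≠ 0
  · rw [filler_eq m hpre.1 (hpre.2 hb)]
  · simp [hb]
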